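-- pv_equiv track=rewrite | github.com/mihail12223/ProjectPM02 | 2 main.py | crack_pincode
-- ===== SOURCE A (Python) =====
-- def crack_pincode(pincode):
--     # Соседи для каждой цифры на клавиатуре (горизонтально/вертикально)
--     neighbors = {
--         '0': ['0', '8'],
--         '1': ['1', '2', '4'],
--         '2': ['1', '2', '3', '5'],
--         '3': ['2', '3', '6'],
--         '4': ['1', '4', '5', '7'],
--         '5': ['2', '4', '5', '6', '8'],
--         '6': ['3', '5', '6', '9'],
--         '7': ['4', '7', '8'],
--         '8': ['0', '5', '7', '8', '9'],
--         '9': ['6', '8', '9']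
--     }
--
--     # Начинаем с пустой строки
--     results = ['']
--
--     # Для каждой цифры в переданном пин-коде
--     for digit in pincode:
--         # Генерируем новые комбинации
--         new_results = []
--         for combo in results:
--             for neighbor in neighbors[digit]:
--                 new_results.append(combo + neighbor)
--         results = new_results
--
--     return results
-- ===== SOURCE B (Python) =====
-- def crack_pincode(pincode):
--     # Recursive decomposition: combos of the tail, prefixed by each neighbor
--     # of the first digit (neighbors stored as digit strings).
--     neighbors = {
--         '0': '08', '1': '124', '2': '1235', '3': '236', '4': '1457',
--         '5': '24568', '6': '3569', '7': '478', '8': '05789', '9': '689'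
--     }
--     if not pincode:
--         return ['']
--     rest = crack_pincode(pincode[1:])
--     return [n + suffix for n in neighbors[pincode[0]] for suffix in rest]
-- ===== Notes on version B (the rewrite author's own statement) =====
-- stated objective: alternative
-- what changed: Replaced A's iterative frontier expansion (rebuilding the whole result list once per digit) by a structural recursion over the pincode: combos of the tail are computed once and each neighbor of the head digit is prefixed, with the neighbor table stored as compact digit strings.
import Mathlib
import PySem

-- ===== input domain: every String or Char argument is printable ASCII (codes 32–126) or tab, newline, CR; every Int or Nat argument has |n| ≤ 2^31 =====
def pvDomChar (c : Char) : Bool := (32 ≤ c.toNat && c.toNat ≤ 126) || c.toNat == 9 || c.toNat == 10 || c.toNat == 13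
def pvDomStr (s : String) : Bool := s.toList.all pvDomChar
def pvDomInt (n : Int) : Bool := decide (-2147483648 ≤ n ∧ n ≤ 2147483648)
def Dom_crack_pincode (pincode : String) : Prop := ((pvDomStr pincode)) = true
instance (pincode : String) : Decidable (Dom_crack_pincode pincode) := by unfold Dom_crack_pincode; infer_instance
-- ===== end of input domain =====

-- B replaces A's iterative frontier expansion by a structural recursion over the
-- pincode (tail combos computed once, head's neighbors prefixed); same values.

-- ===== PORT A =====
-- A's neighbors dict: lookup of a digit returns its list of one-char strings
-- (a missing key is a Python KeyError, excluded by Pre_; default [] is unreachable there).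
def nbA (c : Char) : List String :=
  match c with
  | '0' => ["0", "8"]
  | '1' => ["1", "2", "4"]
  | '2' => ["1", "2", "3", "5"]
  | '3' => ["2", "3", "6"]
  | '4' => ["1", "4", "5", "7"]
  | '5' => ["2", "4", "5", "6", "8"]
  | '6' => ["3", "5", "6", "9"]
  | '7' => ["4", "7", "8"]
  | '8' => ["0", "5", "7", "8", "9"]
  | '9' => ["6", "8", "9"]
  | _ => []

def crack_pincode (pincode : String) : List String :=
  pincode.toList.foldl
    (fun results digit =>
      results.foldl
        (fun new_results combo =>
          (nbA digit).foldl (fun nr neighbor => nr ++ [combo ++ neighbor]) new_results)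
        [])
    [""]

-- ===== PORT B =====
-- B's neighbors dict: digit → string of neighbor digits (KeyError outside Pre_; "" unreachable there).
def nbB (c : Char) : String :=
  match c with
  | '0' => "08"
  | '1' => "124"
  | '2' => "1235"
  | '3' => "236"
  | '4' => "1457"
  | '5' => "24568"
  | '6' => "3569"
  | '7' => "478"
  | '8' => "05789"
  | '9' => "689"
  | _ => ""

def altGo : List Char → List String
  | [] => [""]
  | d :: ds =>
    let rest := altGo ds
    (nbB d).toList.flatMap (fun n => rest.map (fun suffix => String.singleton n ++ suffix))

def crack_pincode_alt (pincode : String) : List String :=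
  altGo pincode.toList

-- ===== PRECONDITION & SPEC =====
-- Pre_ excludes exactly the inputs containing a non-digit character, on which
-- the Python A (and B) raises KeyError.
def Pre_crack_pincode (pincode : String) : Prop :=
  pincode.toList.all (fun c => c.isDigit) = true
instance (pincode : String) : Decidable (Pre_crack_pincode pincode) := by
  unfold Pre_crack_pincode; infer_instance

def pvWitness_crack_pincode : String := "12"

def Spec_crack_pincode (pincode : String) (out : List String) : Prop := out = crack_pincode_alt pincode
instance (pincode : String) (out : List String) : Decidable (Spec_crack_pincode pincode out) := by unfold Spec_crack_pincode; infer_instance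

-- ===== CLAIM (what is proved, stated in full; the proofs are below) =====
def Claim_equal_crack_pincode : Prop := ∀ (pincode : String), Dom_crack_pincode pincode → Pre_crack_pincode pincode → Spec_crack_pincode pincode (crack_pincode pincode)

-- ===== LEMMAS AND PROOFS =====

theorem nbA_eq (c : Char) : nbA c = (nbB c).toList.map (fun n => String.singleton n) := by
  unfold nbA nbB
  split <;> rfl

theorem foldl_app_singleton (l : List String) (combo : String) (init : List String) :
    l.foldl (fun nr neighbor => nr ++ [combo ++ neighbor]) init
      = init ++ l.map (fun n => combo ++ n) := by
  induction l generalizing init with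
  | nil => simp
  | cons x xs ih => simp [List.foldl, ih]

theorem step_eq (acc : List String) (d : Char) (init : List String) :
    acc.foldl
        (fun new_results combo =>
          (nbA d).foldl (fun nr neighbor => nr ++ [combo ++ neighbor]) new_results)
        init
      = init ++ acc.flatMap (fun combo => (nbA d).map (fun n => combo ++ n)) := by
  induction acc generalizing init with
  | nil => simp
  | cons c cs ih =>
    rw [List.foldl_cons, foldl_app_singleton, ih]
    simp [List.append_assoc]

theorem foldl_eq_altGo (l : List Char) (acc : List String) :
    l.foldl
        (fun results digit =>
          results.foldl
            (fun new_results combo =>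
              (nbA digit).foldl (fun nr neighbor => nr ++ [combo ++ neighbor]) new_results)
            [])
        acc
      = acc.flatMap (fun combo => (altGo l).map (fun s => combo ++ s)) := by
  induction l generalizing acc with
  | nil => simp [altGo]
  | cons d ds ih =>
    rw [List.foldl_cons, step_eq, List.nil_append, ih]
    show _ = acc.flatMap (fun combo => (altGo (d :: ds)).map (fun s => combo ++ s))
    simp only [altGo, List.flatMap_assoc, List.map_flatMap, List.flatMap_map, List.map_map]
    refine List.flatMap_congr ?_
    intro combo _
    simp [nbA_eq, List.flatMap_map, Function.comp_def, String.append_assoc]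

-- ===== VERDICT (by name: the statement is the Claim_ definition above) =====
theorem crack_pincode_spec : Claim_equal_crack_pincode := by
  intro pincode _ _
  show crack_pincode pincode = crack_pincode_alt pincode
  unfold crack_pincode crack_pincode_alt
  rw [foldl_eq_altGo]
  simp
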